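-- pv_equiv track=rewrite | github.com/Nareeek/Codesignal_tasks | prime/sumOfCoprimes.py | sumOfCoprimes
-- ===== SOURCE A (Python) =====
-- def sumOfCoprimes(m):
--
--     ans = 0
--     for p in range(2, m + 1):
--         a = p
--         b = m
--         while a > 0:
--             tmp = b % a
--             b = a
--             a = tmp
--
--         if b == 1:
--             ans += p
--
--     return ans
-- ===== SOURCE B (Python) =====
-- def _gcd(x, y):
--     while y:
--         x, y = y, x % y
--     return x
--
--
-- def sumOfCoprimes(m):
--     # Coprimes of m in [1, m-1] come in pairs (p, m-p) summing to m, so it is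
--     # enough to test p up to m//2; subtract the p = 1 term that A's range skips.
--     if m < 2:
--         return 0
--     total = 0
--     for p in range(1, m // 2 + 1):
--         if _gcd(m, p) == 1:
--             total += m if m - p != p else p
--     return total - 1
-- ===== Notes on version B (the rewrite author's own statement) =====
-- stated objective: faster
-- what changed: B pairs each coprime p with its mirror m-p (also coprime, the pair sums to m), so it scans only the lower half of the range and adds m per coprime pair, instead of A's scan of every candidate up to m.
import Mathlib
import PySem

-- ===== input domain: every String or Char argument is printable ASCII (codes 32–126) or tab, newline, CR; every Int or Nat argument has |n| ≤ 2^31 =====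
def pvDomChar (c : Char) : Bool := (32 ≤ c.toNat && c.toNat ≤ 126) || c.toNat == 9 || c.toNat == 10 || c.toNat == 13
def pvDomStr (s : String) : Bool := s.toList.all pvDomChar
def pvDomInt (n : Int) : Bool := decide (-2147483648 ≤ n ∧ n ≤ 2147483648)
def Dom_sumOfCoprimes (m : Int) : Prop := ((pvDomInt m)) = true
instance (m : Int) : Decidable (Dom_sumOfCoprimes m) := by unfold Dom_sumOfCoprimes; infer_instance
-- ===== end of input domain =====

-- B halves the scanned range by pairing each coprime p with m - p; proved to return A's exact value for every m.


-- ===== PORT A =====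
-- A's inner 'while a > 0: tmp = b % a; b = a; a = tmp' as a recursion on the state (a, b)
def pyGcdLoop (a b : Int) : Int :=
  if h : a > 0 then pyGcdLoop (PySem.Int.mod b a) a else b
termination_by a.toNat
decreasing_by
  have h1 := PySem.Int.mod_nonneg b h
  have h2 := PySem.Int.mod_lt b h
  omega

def sumOfCoprimes (m : Int) : Int :=
  (PySem.List.pyRange 2 (m + 1) 1).foldl
    (fun ans p => if pyGcdLoop p m = 1 then ans + p else ans) 0

-- ===== PORT B =====
-- Source B's '_gcd': while y: x, y = y, x % y
def altGcd (x y : Int) : Int :=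
  if h : y ≠ 0 then altGcd y (PySem.Int.mod x y) else x
termination_by y.natAbs
decreasing_by
  rcases lt_or_gt_of_ne h with hy | hy
  · have := PySem.Int.mod_neg_bounds x hy
    omega
  · have h1 := PySem.Int.mod_nonneg x hy
    have h2 := PySem.Int.mod_lt x hy
    omega

def sumOfCoprimes_alt (m : Int) : Int :=
  if m < 2 then 0
  else
    ((PySem.List.pyRange 1 (PySem.Int.floordiv m 2 + 1) 1).foldl
      (fun total p =>
        if altGcd m p = 1 then total + (if m - p ≠ p then m else p) else total) 0) - 1

-- ===== PRECONDITION & SPEC =====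
def Spec_sumOfCoprimes (m : Int) (out : Int) : Prop := out = sumOfCoprimes_alt m
instance (m : Int) (out : Int) : Decidable (Spec_sumOfCoprimes m out) := by unfold Spec_sumOfCoprimes; infer_instance

-- ===== CLAIM (what is proved, stated in full; the proofs are below) =====
def Claim_equal_sumOfCoprimes : Prop := ∀ (m : Int), Dom_sumOfCoprimes m → Spec_sumOfCoprimes m (sumOfCoprimes m)

-- ===== LEMMAS AND PROOFS =====

-- A's Euclid loop computes Int.gcd on nonnegative inputs
theorem pyGcdLoop_eq_gcd (a b : Int) (ha : 0 ≤ a) (hb : 0 ≤ b) :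
    pyGcdLoop a b = (Int.gcd a b : Int) := by
  by_cases h : a > 0
  · rw [pyGcdLoop, dif_pos h]
    have h1 := PySem.Int.mod_nonneg b h
    rw [pyGcdLoop_eq_gcd _ _ h1 ha, PySem.Int.mod_eq_emod_of_pos h, Int.gcd_emod,
      Int.gcd_comm]
  · rw [pyGcdLoop, dif_neg h]
    have : a = 0 := le_antisymm (by omega) ha
    subst this
    simp [Int.natAbs_of_nonneg hb]
termination_by a.toNat
decreasing_by
  have h1 := PySem.Int.mod_nonneg b h
  have h2 := PySem.Int.mod_lt b h
  omega

-- B's _gcd computes Int.gcd on nonnegative inputs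
theorem altGcd_eq_gcd (x y : Int) (hx : 0 ≤ x) (hy : 0 ≤ y) :
    altGcd x y = (Int.gcd x y : Int) := by
  by_cases h : y ≠ 0
  · rw [altGcd, dif_pos h]
    have hy' : 0 < y := lt_of_le_of_ne hy (Ne.symm h)
    have h1 := PySem.Int.mod_nonneg x hy'
    rw [altGcd_eq_gcd _ _ hy h1, PySem.Int.mod_eq_emod_of_pos hy', Int.gcd_comm y,
      Int.gcd_emod]
  · rw [altGcd, dif_neg h]
    push Not at h
    subst h
    simp [Int.natAbs_of_nonneg hx]
termination_by y.natAbs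
decreasing_by
  have h1 := PySem.Int.mod_nonneg x (by omega)
  have h2 := PySem.Int.mod_lt x (by omega)
  omega

-- a foldl accumulating 'if c p then acc + f p else acc' over range(a, b) is init + a sum over Finset.Ico
theorem foldl_if_add_pyRange (a b : Int) (c : Int → Prop) [DecidablePred c]
    (f : Int → Int) (init : Int) :
    (PySem.List.pyRange a b 1).foldl (fun acc p => if c p then acc + f p else acc) init
      = init + ∑ p ∈ Finset.Ico a b, (if c p then f p else 0) := by
  have hfun : (fun (acc : Int) p => if c p then acc + f p else acc)
      = (fun acc p => acc + (if c p then f p else 0)) := by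
    funext acc p; split <;> simp
  rw [hfun, PySem.List.foldl_add]
  congr 1
  induction hn : (b - a).toNat generalizing b with
  | zero =>
    rw [PySem.List.pyRange_one_eq_nil (by omega), Finset.Ico_eq_empty (by omega)]
    simp
  | succ n ih =>
    have hb : a ≤ b - 1 := by omega
    have hb1 : b - 1 + 1 = b := by omega
    rw [← hb1, PySem.List.pyRange_one_succ_right hb]
    rw [show Finset.Ico a (b - 1 + 1) = insert (b - 1) (Finset.Ico a (b - 1)) by
      ext x; simp [Finset.mem_Ico, Finset.mem_insert]; omega]
    rw [Finset.sum_insert (by simp [Finset.mem_Ico])]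
    rw [List.map_append, List.sum_append, ih (b - 1) (by omega)]
    simp [add_comm]

theorem ico_split_sum (a b c : Int) (hab : a ≤ b) (hbc : b ≤ c) (f : Int → Int) :
    ∑ p ∈ Finset.Ico a c, f p
      = (∑ p ∈ Finset.Ico a b, f p) + ∑ p ∈ Finset.Ico b c, f p := by
  rw [← Finset.Ico_union_Ico_eq_Ico hab hbc,
    Finset.sum_union (Finset.Ico_disjoint_Ico_consecutive a b c)]

-- the pairing p ↔ m - p: A's sum over [2, m] equals B's half-range sum minus 1
theorem pairing_identity (m : Int) (hm : 2 ≤ m) :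
    ∑ p ∈ Finset.Ico 2 (m + 1), (if Int.gcd p m = 1 then p else 0)
      = (∑ p ∈ Finset.Ico 1 (m / 2 + 1),
          (if Int.gcd p m = 1 then (if m - p ≠ p then m else p) else 0)) - 1 := by
  set f : Int → Int := fun p => if Int.gcd p m = 1 then p else 0 with hf
  have h1 : ∑ p ∈ Finset.Ico 1 m, f p = (∑ p ∈ Finset.Ico 2 (m + 1), f p) + 1 := by
    have e1 : ∑ p ∈ Finset.Ico 1 (m + 1), f p
        = (∑ p ∈ Finset.Ico 1 2, f p) + ∑ p ∈ Finset.Ico 2 (m + 1), f p :=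
      ico_split_sum 1 2 (m + 1) (by omega) (by omega) f
    have e2 : ∑ p ∈ Finset.Ico 1 (m + 1), f p
        = (∑ p ∈ Finset.Ico 1 m, f p) + ∑ p ∈ Finset.Ico m (m + 1), f p :=
      ico_split_sum 1 m (m + 1) (by omega) (by omega) f
    have e3 : ∑ p ∈ Finset.Ico 1 2, f p = 1 := by
      rw [show Finset.Ico (1:Int) 2 = {1} by rfl, Finset.sum_singleton]
      simp [hf]
    have e4 : ∑ p ∈ Finset.Ico m (m + 1), f p = 0 := by
      rw [show Finset.Ico m (m + 1) = {m} by ext x; simp [Finset.mem_Ico]; omega,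
        Finset.sum_singleton]
      have hne : ¬ (Int.gcd m m = 1) := by rw [Int.gcd_self]; omega
      show (if Int.gcd m m = 1 then m else 0) = 0
      rw [if_neg hne]
    omega
  have hh1 : (1:Int) ≤ m / 2 + 1 := by omega
  have hh2 : m / 2 + 1 ≤ m := by omega
  have h2 : ∑ p ∈ Finset.Ico 1 m, f p
      = (∑ p ∈ Finset.Ico 1 (m / 2 + 1), f p)
        + ∑ p ∈ Finset.Ico (m / 2 + 1) m, f p :=
    ico_split_sum 1 (m / 2 + 1) m hh1 hh2 f
  have h3 : ∑ p ∈ Finset.Ico (m / 2 + 1) m, f p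
      = ∑ q ∈ Finset.Ico 1 (m / 2 + 1),
          (if Int.gcd q m = 1 ∧ m - q ≠ q then m - q else 0) := by
    rw [← Finset.sum_filter, ← Finset.sum_filter]
    refine (Finset.sum_nbij' (fun p => m - p) (fun q => m - q) ?_ ?_ ?_ ?_ ?_).symm
    · intro q hq
      simp only [Finset.mem_filter, Finset.mem_Ico] at hq ⊢
      refine ⟨⟨by omega, by omega⟩, ?_⟩
      rw [Int.gcd_self_sub_left]
      exact hq.2.1
    · intro p hp
      simp only [Finset.mem_filter, Finset.mem_Ico] at hp ⊢
      refine ⟨⟨by omega, by omega⟩, ?_, by omega⟩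
      rw [Int.gcd_self_sub_left]
      exact hp.2
    · intro q _; show m - (m - q) = q; omega
    · intro p _; show m - (m - p) = p; omega
    · intro q hq
      simp only [Finset.mem_filter, Finset.mem_Ico] at hq
      simp
  have h4 : ∑ p ∈ Finset.Ico 1 (m / 2 + 1),
        (if Int.gcd p m = 1 then (if m - p ≠ p then m else p) else 0)
      = (∑ p ∈ Finset.Ico 1 (m / 2 + 1), f p)
        + ∑ q ∈ Finset.Ico 1 (m / 2 + 1),
            (if Int.gcd q m = 1 ∧ m - q ≠ q then m - q else 0) := by
    rw [← Finset.sum_add_distrib]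
    refine Finset.sum_congr rfl ?_
    intro p _
    simp only [hf]
    split_ifs with hg hne hne' <;> simp_all
  rw [h4, ← h3, ← h2]
  show ∑ p ∈ Finset.Ico 2 (m + 1), f p = ∑ p ∈ Finset.Ico 1 m, f p - 1
  omega

-- ===== VERDICT (by name: the statement is the Claim_ definition above) =====
theorem sumOfCoprimes_spec : Claim_equal_sumOfCoprimes := by
  intro m _
  show sumOfCoprimes m = sumOfCoprimes_alt m
  unfold sumOfCoprimes sumOfCoprimes_alt
  by_cases hm : m < 2
  · rw [if_pos hm, PySem.List.pyRange_one_eq_nil (by omega)]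
    rfl
  · rw [if_neg hm]
    rw [foldl_if_add_pyRange 2 (m + 1) (fun p => pyGcdLoop p m = 1) (fun p => p) 0]
    rw [foldl_if_add_pyRange 1 (PySem.Int.floordiv m 2 + 1)
      (fun p => altGcd m p = 1) (fun p => if m - p ≠ p then m else p) 0]
    rw [PySem.Int.floordiv_eq_ediv_of_pos (by norm_num : (0:Int) < 2)]
    have hA : ∑ p ∈ Finset.Ico 2 (m + 1), (if pyGcdLoop p m = 1 then p else 0)
        = ∑ p ∈ Finset.Ico 2 (m + 1), (if Int.gcd p m = 1 then p else 0) := by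
      refine Finset.sum_congr rfl ?_
      intro p hp
      simp only [Finset.mem_Ico] at hp
      rw [pyGcdLoop_eq_gcd p m (by omega) (by omega)]
      norm_cast
    have hB : ∑ p ∈ Finset.Ico 1 (m / 2 + 1),
          (if altGcd m p = 1 then (if m - p ≠ p then m else p) else 0)
        = ∑ p ∈ Finset.Ico 1 (m / 2 + 1),
          (if Int.gcd p m = 1 then (if m - p ≠ p then m else p) else 0) := by
      refine Finset.sum_congr rfl ?_
      intro p hp
      simp only [Finset.mem_Ico] at hp
      rw [altGcd_eq_gcd m p (by omega) (by omega), Int.gcd_comm m p]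
      norm_cast
    rw [hA, hB]
    rw [pairing_identity m (by omega)]
    ring
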